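-- pv_equiv track=rewrite | github.com/fevzifevziev/- | mergeSort.py | painting
-- ===== SOURCE A (Python) =====
-- def painting(length, left, middle, right):
--     """Функция цветовой разметки элементов массива на холсте"""
--     colors = []
--     for i in range(length):
--         if i >= left and i <= right:
--             if i >= left and i <= middle:
--                 colors.append("#5E5CE6")                                        #синий
--             else:
--                 colors.append("#77E596")                                        #зеленый
--         else:
--             colors.append("#FE8045")                                            #оранжевый
--
--     return colors
-- ===== SOURCE B (Python) =====
-- def painting(length, left, middle, right):
--     colors = ["#FE8045"] * length
--     bs, be = max(left, 0), min(middle, right, length - 1)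
--     if bs <= be:
--         colors[bs:be + 1] = ["#5E5CE6"] * (be + 1 - bs)
--     gs, ge = max(left, middle + 1, 0), min(right, length - 1)
--     if gs <= ge:
--         colors[gs:ge + 1] = ["#77E596"] * (ge + 1 - gs)
--     return colors
-- ===== Notes on version B (the rewrite author's own statement) =====
-- stated objective: alternative
-- what changed: Replaces the per-index membership test loop with bulk construction: an all-orange list built once, then the clamped blue and green runs written in as slice assignments.
import Mathlib
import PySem

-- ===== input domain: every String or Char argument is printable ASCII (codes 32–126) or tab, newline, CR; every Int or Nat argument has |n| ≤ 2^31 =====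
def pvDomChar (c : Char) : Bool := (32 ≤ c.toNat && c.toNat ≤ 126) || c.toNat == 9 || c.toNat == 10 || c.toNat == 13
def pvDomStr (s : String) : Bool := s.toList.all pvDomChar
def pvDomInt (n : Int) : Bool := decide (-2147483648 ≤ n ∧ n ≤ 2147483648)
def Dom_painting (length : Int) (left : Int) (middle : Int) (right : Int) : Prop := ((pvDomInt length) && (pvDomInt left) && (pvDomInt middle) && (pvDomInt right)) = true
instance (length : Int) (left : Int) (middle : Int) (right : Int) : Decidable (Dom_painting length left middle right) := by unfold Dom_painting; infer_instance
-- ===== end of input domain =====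

-- B builds the all-orange list once and overwrites the clamped blue and green runs
-- by slice assignment, instead of A's per-index membership tests (objective: alternative).

-- ===== PORT A =====
-- literal port of A: append one colour per i in range(length)
def painting (length : Int) (left : Int) (middle : Int) (right : Int) : List String :=
  (PySem.List.pyRange 0 length 1).foldl
    (fun colors i =>
      if left ≤ i ∧ i ≤ right then
        if left ≤ i ∧ i ≤ middle then colors ++ ["#5E5CE6"]
        else colors ++ ["#77E596"]
      else colors ++ ["#FE8045"])
    []

-- ===== PORT B =====
-- slice assignment colors[s:e+1] = [c]*(e+1-s) with 0 ≤ s ≤ e < length: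
-- exact as take/replicate/drop since the clamped bounds are in range
def pvSplice (xs : List String) (s m : Nat) (c : String) : List String :=
  xs.take s ++ List.replicate m c ++ xs.drop (s + m)

def painting_alt (length : Int) (left : Int) (middle : Int) (right : Int) : List String :=
  let colors := List.replicate length.toNat "#FE8045"   -- ["#FE8045"] * length
  let bs := max left 0
  let be := min (min middle right) (length - 1)
  let colors := if bs ≤ be then pvSplice colors bs.toNat (be + 1 - bs).toNat "#5E5CE6" else colors
  let gs := max (max left (middle + 1)) 0
  let ge := min right (length - 1)
  let colors := if gs ≤ ge then pvSplice colors gs.toNat (ge + 1 - gs).toNat "#77E596" else colors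
  colors

-- ===== PRECONDITION & SPEC =====
def Spec_painting (length : Int) (left : Int) (middle : Int) (right : Int) (out : List String) : Prop := out = painting_alt length left middle right
instance (length : Int) (left : Int) (middle : Int) (right : Int) (out : List String) : Decidable (Spec_painting length left middle right out) := by unfold Spec_painting; infer_instance

-- ===== CLAIM (what is proved, stated in full; the proofs are below) =====
def Claim_equal_painting : Prop := ∀ (length : Int) (left : Int) (middle : Int) (right : Int), Dom_painting length left middle right → Spec_painting length left middle right (painting length left middle right)

-- ===== LEMMAS AND PROOFS =====

-- the per-index colour function A computes
def pvColor (left middle right : Int) (i : Int) : String :=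
  if left ≤ i ∧ i ≤ right then
    if left ≤ i ∧ i ≤ middle then "#5E5CE6" else "#77E596"
  else "#FE8045"

theorem pv_foldl_append (g : Int → String) (xs : List Int) (acc : List String) :
    xs.foldl (fun a i => a ++ [g i]) acc = acc ++ xs.map g := by
  induction xs generalizing acc with
  | nil => simp
  | cons x xs ih => simp [List.foldl, ih]

theorem painting_char (length left middle right : Int) :
    painting length left middle right
      = (List.range length.toNat).map (fun (k : Nat) => pvColor left middle right (k : Int)) := by
  unfold painting
  have h : (fun (colors : List String) (i : Int) =>
      if left ≤ i ∧ i ≤ right then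
        if left ≤ i ∧ i ≤ middle then colors ++ ["#5E5CE6"]
        else colors ++ ["#77E596"]
      else colors ++ ["#FE8045"])
      = fun colors i => colors ++ [pvColor left middle right i] := by
    funext colors i
    unfold pvColor
    split_ifs <;> rfl
  rw [h, pv_foldl_append, PySem.List.pyRange_one]
  rw [List.map_map]
  simp only [Int.sub_zero, List.nil_append]
  apply List.map_congr_left
  intro k _
  simp

theorem pvSplice_map_range (n s m : Nat) (c : String) (g : Nat → String) (h : s + m ≤ n) :
    pvSplice ((List.range n).map g) s m c
      = (List.range n).map (fun k => if s ≤ k ∧ k < s + m then c else g k) := by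
  unfold pvSplice
  apply List.ext_getElem
  · simp; omega
  · intro i h1 h2
    have hi : i < n := by simpa using h2
    rw [List.getElem_map, List.getElem_range]
    by_cases c1 : i < s
    · rw [List.getElem_append_left (by simp; omega), List.getElem_append_left (by simp; omega),
        List.getElem_take, List.getElem_map, List.getElem_range, if_neg (by omega)]
    · by_cases c2 : i < s + m
      · rw [List.getElem_append_left (by simp; omega), List.getElem_append_right (by simp; omega),
          List.getElem_replicate, if_pos (by omega)]
      · rw [List.getElem_append_right (by simp; omega), List.getElem_drop, List.getElem_map,
          List.getElem_range, if_neg (by omega)]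
        congr 1
        simp
        omega

theorem pv_congr (n : Nat) (f g : Nat → String) (h : ∀ k, k < n → f k = g k) :
    (List.range n).map f = (List.range n).map g := by
  apply List.map_congr_left
  intro k hk
  exact h k (List.mem_range.mp hk)

theorem painting_alt_char (length left middle right : Int) :
    painting_alt length left middle right
      = (List.range length.toNat).map (fun (k : Nat) => pvColor left middle right (k : Int)) := by
  unfold painting_alt
  dsimp only
  rw [show List.replicate length.toNat "#FE8045"
      = (List.range length.toNat).map (fun _ => "#FE8045") from by simp]
  by_cases hb : max left 0 ≤ min (min middle right) (length - 1)
  · rw [if_pos hb, pvSplice_map_range _ _ _ _ _ (by omega)]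
    by_cases hg : max (max left (middle + 1)) 0 ≤ min right (length - 1)
    · rw [if_pos hg, pvSplice_map_range _ _ _ _ _ (by omega)]
      apply pv_congr
      intro k hk
      unfold pvColor
      split_ifs <;> first | rfl | (exfalso; omega)
    · rw [if_neg hg]
      apply pv_congr
      intro k hk
      unfold pvColor
      split_ifs <;> first | rfl | (exfalso; omega)
  · rw [if_neg hb]
    by_cases hg : max (max left (middle + 1)) 0 ≤ min right (length - 1)
    · rw [if_pos hg, pvSplice_map_range _ _ _ _ _ (by omega)]
      apply pv_congr
      intro k hk
      unfold pvColor
      split_ifs <;> first | rfl | (exfalso; omega)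
    · rw [if_neg hg]
      apply pv_congr
      intro k hk
      unfold pvColor
      split_ifs <;> first | rfl | (exfalso; omega)

-- ===== VERDICT (by name: the statement is the Claim_ definition above) =====
theorem painting_spec : Claim_equal_painting := by
  intro length left middle right _
  unfold Spec_painting
  rw [painting_char, painting_alt_char]
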